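-- pv_equiv track=rewrite | github.com/nagyist/airweave | backend/airweave/domains/converters/web.py | _match_url
-- ===== SOURCE A (Python) =====
-- from typing import Any, Dict, List, Optional
--
-- def _match_url(source_url: str, original_urls: List[str]) -> Optional[str]:
--     if source_url in original_urls:
--         return source_url
--
--     normalized_source = source_url.rstrip("/")
--     for url in original_urls:
--         if url.rstrip("/") == normalized_source:
--             return url
--
--     return None
-- ===== SOURCE B (Python) =====
-- from typing import List, Optional
--
-- def _match_url(source_url: str, original_urls: List[str]) -> Optional[str]:
--     normalized_source = source_url.rstrip("/")
--     candidate = None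
--     for url in original_urls:
--         if url == source_url:
--             return source_url
--         if candidate is None and url.rstrip("/") == normalized_source:
--             candidate = url
--     return candidate
-- ===== Notes on version B (the rewrite author's own statement) =====
-- stated objective: alternative
-- what changed: Replaced A's membership test plus a second normalization loop with one single pass that returns immediately on an exact match and remembers the first normalized-only match as a candidate.
import Mathlib
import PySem

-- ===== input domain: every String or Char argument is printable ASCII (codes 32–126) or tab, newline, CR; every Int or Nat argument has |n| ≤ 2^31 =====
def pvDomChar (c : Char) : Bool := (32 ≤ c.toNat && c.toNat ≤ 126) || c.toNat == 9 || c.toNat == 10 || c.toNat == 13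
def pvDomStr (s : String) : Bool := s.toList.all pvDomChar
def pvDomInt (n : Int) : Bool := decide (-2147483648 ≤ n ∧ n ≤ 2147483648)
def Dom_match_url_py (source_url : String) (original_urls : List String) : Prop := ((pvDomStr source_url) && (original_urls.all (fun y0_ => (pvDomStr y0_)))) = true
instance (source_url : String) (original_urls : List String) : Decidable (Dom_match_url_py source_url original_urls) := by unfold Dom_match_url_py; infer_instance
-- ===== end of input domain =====

-- B replaces A's membership test + second normalization loop by one single pass
-- that returns on an exact match and remembers the first normalized-only match.


-- hand port of str.rstrip("/"): drop trailing '/' code points (exact: rstrip with a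
-- one-character set removes exactly the trailing occurrences of that character)
def pvRstripSlash (cs : List Char) : List Char :=
  (cs.reverse.dropWhile (· == '/')).reverse

-- ===== PORT A =====
def match_url_py (source_url : String) (original_urls : List String) : Option String :=
  if original_urls.contains source_url then some source_url
  else
    let normalized_source := pvRstripSlash source_url.toList
    original_urls.find? (fun url => pvRstripSlash url.toList == normalized_source)

-- ===== PORT B =====
def match_url_py_alt_loop (source_url : String) (normalized_source : List Char)
    (candidate : Option String) : List String → Option String
  | [] => candidate
  | url :: rest =>
    if url == source_url then some source_url
    else
      match_url_py_alt_loop source_url normalized_source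
        (if candidate.isNone && (pvRstripSlash url.toList == normalized_source)
         then some url else candidate) rest

def match_url_py_alt (source_url : String) (original_urls : List String) : Option String :=
  match_url_py_alt_loop source_url (pvRstripSlash source_url.toList) none original_urls

-- ===== PRECONDITION & SPEC =====
def Spec_match_url_py (source_url : String) (original_urls : List String) (out : Option String) : Prop := out = match_url_py_alt source_url original_urls
instance (source_url : String) (original_urls : List String) (out : Option String) : Decidable (Spec_match_url_py source_url original_urls out) := by unfold Spec_match_url_py; infer_instance

-- ===== CLAIM (what is proved, stated in full; the proofs are below) =====
def Claim_equal_match_url_py : Prop := ∀ (source_url : String) (original_urls : List String), Dom_match_url_py source_url original_urls → Spec_match_url_py source_url original_urls (match_url_py source_url original_urls)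

-- ===== LEMMAS AND PROOFS =====

lemma match_url_py_alt_loop_eq (s : String) (ns : List Char) (cand : Option String)
    (urls : List String) :
    match_url_py_alt_loop s ns cand urls =
      if urls.contains s then some s
      else match cand with
        | some c => some c
        | none => urls.find? (fun u => pvRstripSlash u.toList == ns) := by
  induction urls generalizing cand with
  | nil =>
    simp [match_url_py_alt_loop]
    cases cand <;> simp
  | cons u rest ih =>
    by_cases hu : u == s
    · have : u = s := by simpa using hu
      simp [match_url_py_alt_loop, this]
    · rw [match_url_py_alt_loop, if_neg (by simpa using hu), ih]
      have hc : (u :: rest).contains s = rest.contains s := by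
        simp
        intro h; exact absurd (by simpa using h.symm) (by simpa using hu)
      rw [hc]
      by_cases hr : rest.contains s
      · rw [if_pos hr, if_pos hr]
      · rw [if_neg hr, if_neg hr]
        cases cand with
        | some c => simp
        | none =>
          by_cases hp : pvRstripSlash u.toList == ns
          · simp [List.find?, hp]
          · simp [List.find?, hp]

-- ===== VERDICT (by name: the statement is the Claim_ definition above) =====
theorem match_url_py_spec : Claim_equal_match_url_py := by
  intro s urls _
  unfold Spec_match_url_py match_url_py match_url_py_alt
  rw [match_url_py_alt_loop_eq]
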